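-- pv_equiv track=rewrite | github.com/TomekBarabasz/hackerrank-ai | python/codility-ms1.py | solution
-- ===== SOURCE A (Python) =====
-- def removeUsedPairs(pairs, idx):
--     return [ (i1,i2) for (i1,i2) in pairs if i1!=idx and i2!=idx ]
--
-- def solution(A):
--     if len(A)==1: return 0
--     Pairs = []
--     for i in range(len(A)):
--         i2 = (i+1) % len(A)
--         if (A[i] + A[i2]) % 2 == 0:
--             Pairs.append( (i,i2) )
--
--     stack = [ (Pairs, 0, 0) ] #avalable pairs, next pair idx, num pairs
--
--     max_pairs = 0
--     while stack:
--         Pairs, start, npairs = stack.pop(0)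
--         if len(Pairs)==0 or start >= len(Pairs):
--             if npairs > max_pairs:
--                 max_pairs = npairs
--         else:
--             idx = start
--             for idx in range(start,len(Pairs)):
--                 i0,i1 = Pairs[idx]
--                 NPairs = removeUsedPairs(Pairs,  i0)
--                 NPairs = removeUsedPairs(NPairs, i1)
--                 stack.append( (NPairs, 0, npairs+1) )
--
--     return max_pairs
-- ===== SOURCE B (Python) =====
-- def solution(A):
--     if len(A) == 1:
--         return 0
--     n = len(A)
--     pairs = [(i, (i + 1) % n) for i in range(n) if (A[i] + A[(i + 1) % n]) % 2 == 0]
--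
--     def best(ps):
--         if not ps:
--             return 0
--         (a, b), rest = ps[0], ps[1:]
--         compat = [(x, y) for (x, y) in rest if x != a and x != b and y != a and y != b]
--         return max(1 + best(compat), best(rest))
--
--     return best(pairs)
-- ===== Notes on version B (the rewrite author's own statement) =====
-- stated objective: alternative
-- what changed: A enumerates matchings breadth-first with a FIFO queue, branching on every remaining pair at every step; B builds the adjacent even-sum pair list once and uses a binary take-or-skip recursion on it (each pair is either used, with conflicting pairs filtered out, or skipped).
import Mathlib
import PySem

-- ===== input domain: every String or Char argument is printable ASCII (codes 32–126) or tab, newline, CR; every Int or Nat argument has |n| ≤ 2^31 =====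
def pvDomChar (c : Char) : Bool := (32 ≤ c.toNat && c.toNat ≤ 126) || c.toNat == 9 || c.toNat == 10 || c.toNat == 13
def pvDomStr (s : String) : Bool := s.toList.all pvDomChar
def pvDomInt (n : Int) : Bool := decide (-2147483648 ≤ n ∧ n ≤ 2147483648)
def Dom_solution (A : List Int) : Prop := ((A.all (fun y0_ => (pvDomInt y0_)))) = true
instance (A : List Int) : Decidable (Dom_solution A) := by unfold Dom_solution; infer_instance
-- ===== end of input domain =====

-- B replaces A's breadth-first enumeration over every remaining pair (a FIFO queue of shrinking
-- pair lists) by a binary take-or-skip recursion on the pair list (alternative algorithm, same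
-- return value; the helper lemmas before `aLoop` are cited by its termination proof).

-- ===== PORT A =====
-- ===== PORT A =====
def removeUsedPairs (pairs : List (Int × Int)) (idx : Int) : List (Int × Int) :=
  pairs.filter (fun p => p.1 != idx && p.2 != idx)

def buildPairs (A : List Int) : List (Int × Int) :=
  (List.range A.length).foldl (fun acc i =>
    let i2 := (i + 1) % A.length
    if PySem.Int.mod (A.getD i 0 + A.getD i2 0) 2 == 0 then acc ++ [((i : Int), (i2 : Int))]
    else acc) []

def msum (stack : List (List (Int × Int) × Nat × Int)) : Nat :=
  (stack.map (fun s => Nat.factorial (s.1.length + 1))).sum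

lemma child_len_lt (P : List (Int × Int)) (idx : Nat) (h : idx < P.length) :
    (removeUsedPairs (removeUsedPairs P (P.getD idx (0, 0)).1) (P.getD idx (0, 0)).2).length
      < P.length := by
  have hmem : P.getD idx (0, 0) ∈ P := by
    rw [List.getD_eq_getElem P (0,0) h]; exact List.getElem_mem h
  have h1 : (removeUsedPairs P (P.getD idx (0, 0)).1).length < P.length := by
    unfold removeUsedPairs
    exact List.length_filter_lt_length_iff_exists.mpr ⟨P.getD idx (0,0), hmem, by simp⟩
  calc (removeUsedPairs (removeUsedPairs P (P.getD idx (0, 0)).1) (P.getD idx (0, 0)).2).length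
      ≤ (removeUsedPairs P (P.getD idx (0, 0)).1).length := List.length_filter_le _ _
    _ < P.length := h1

lemma msum_children_lt (P : List (Int × Int)) (start : Nat) (np : Int)
    (rest : List (List (Int × Int) × Nat × Int)) (hs : start < P.length) :
    msum (rest ++ (List.range' start (P.length - start)).map (fun idx =>
      (removeUsedPairs (removeUsedPairs P (P.getD idx (0, 0)).1) (P.getD idx (0, 0)).2,
        (0 : Nat), np + 1)))
      < msum ((P, start, np) :: rest) := by
  simp only [msum, List.map_append, List.sum_append, List.map_cons, List.sum_cons, List.map_map]
  have hb : ∀ x ∈ (List.range' start (P.length - start)).map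
      ((fun s => Nat.factorial (s.1.length + 1)) ∘ (fun idx =>
        (removeUsedPairs (removeUsedPairs P (P.getD idx (0, 0)).1) (P.getD idx (0, 0)).2,
          (0 : Nat), np + 1))), x ≤ Nat.factorial P.length := by
    intro x hx
    obtain ⟨idx, hidx, rfl⟩ := List.mem_map.mp hx
    have hlt : idx < P.length := (List.mem_range'_1.mp hidx).2.trans_le (by omega)
    have hc := child_len_lt P idx hlt
    simp only [Function.comp]
    exact Nat.factorial_le (by omega)
  have hsum := List.sum_le_card_nsmul _ _ hb
  have hlen : ((List.range' start (P.length - start)).map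
      ((fun s => Nat.factorial (s.1.length + 1)) ∘ (fun idx =>
        (removeUsedPairs (removeUsedPairs P (P.getD idx (0, 0)).1) (P.getD idx (0, 0)).2,
          (0 : Nat), np + 1)))).length = P.length - start := by simp
  rw [hlen] at hsum
  have hfp : 0 < Nat.factorial P.length := Nat.factorial_pos _
  have : (P.length - start) * Nat.factorial P.length < Nat.factorial (P.length + 1) := by
    rw [Nat.factorial_succ]
    have h1 : P.length - start ≤ P.length := Nat.sub_le _ _
    calc (P.length - start) * Nat.factorial P.length
        ≤ P.length * Nat.factorial P.length := Nat.mul_le_mul_right _ h1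
      _ < (P.length + 1) * Nat.factorial P.length := by
          exact (Nat.mul_lt_mul_right hfp).mpr (by omega)
  simp only [smul_eq_mul] at hsum
  omega

def aLoop (stack : List (List (Int × Int) × Nat × Int)) (maxPairs : Int) : Int :=
  match stack with
  | [] => maxPairs
  | (Pairs, start, npairs) :: rest =>
    if Pairs.length = 0 ∨ Pairs.length ≤ start then
      aLoop rest (if npairs > maxPairs then npairs else maxPairs)
    else
      aLoop (rest ++ (List.range' start (Pairs.length - start)).map (fun idx =>
        let p := Pairs.getD idx (0, 0)
        (removeUsedPairs (removeUsedPairs Pairs p.1) p.2, (0 : Nat), npairs + 1))) maxPairs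
termination_by msum stack
decreasing_by
· simp only [msum, List.map_cons, List.sum_cons]
  have := Nat.factorial_pos (Pairs.length + 1); omega
· exact msum_children_lt Pairs start npairs rest (by omega)

def solution (A : List Int) : Int :=
  if A.length == 1 then 0
  else aLoop [(buildPairs A, 0, 0)] 0

-- ===== PORT B =====
def compat (p q : Int × Int) : Bool :=
  q.1 != p.1 && q.1 != p.2 && q.2 != p.1 && q.2 != p.2

def best (ps : List (Int × Int)) : Int :=
  match ps with
  | [] => 0
  | p :: rest => max (1 + best (rest.filter (compat p))) (best rest)
termination_by ps.length
decreasing_by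
· have := List.length_filter_le (compat p) rest; simp; omega
· simp


def pairsB (A : List Int) : List (Int × Int) :=
  ((List.range A.length).filter (fun i =>
      PySem.Int.mod (A.getD i 0 + A.getD ((i + 1) % A.length) 0) 2 == 0)).map
    (fun i => let i2 := (i + 1) % A.length; ((i : Int), (i2 : Int)))

def solution_alt (A : List Int) : Int :=
  if A.length == 1 then 0
  else best (pairsB A)

-- ===== PRECONDITION & SPEC =====
def Spec_solution (A : List Int) (out : Int) : Prop := out = solution_alt A
instance (A : List Int) (out : Int) : Decidable (Spec_solution A out) := by unfold Spec_solution; infer_instance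

-- ===== CLAIM (what is proved, stated in full; the proofs are below) =====
def Claim_equal_solution : Prop := ∀ (A : List Int), Dom_solution A → Spec_solution A (solution A)

-- ===== LEMMAS AND PROOFS =====
-- ===== ν theory =====
def goodB : List (Int × Int) → Bool
  | [] => true
  | p :: S => S.all (compat p) && goodB S

def nuMax (P : List (Int × Int)) : Nat :=
  ((P.sublists.filter goodB).map List.length).foldr max 0

lemma compat_self (p : Int × Int) : compat p p = false := by
  simp [compat]

lemma compat_symm (p q : Int × Int) : compat p q = compat q p := by
  rw [Bool.eq_iff_iff]; simp [compat]; tauto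

lemma goodB_iff (S : List (Int × Int)) :
    goodB S = true ↔ S.Pairwise (fun a b => compat a b = true) := by
  induction S with
  | nil => simp [goodB]
  | cons p S ih => simp [goodB, List.all_eq_true, List.pairwise_cons, ih]

lemma mem_le_foldr_max (a : Nat) (l : List Nat) (h : a ∈ l) : a ≤ l.foldr max 0 := by
  induction l with
  | nil => cases h
  | cons x t ih =>
    rcases List.mem_cons.mp h with rfl | h
    · simp only [List.foldr]; omega
    · have := ih h; simp only [List.foldr]; omega

lemma foldr_max_cases (l : List Nat) : l.foldr max 0 = 0 ∨ l.foldr max 0 ∈ l := by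
  induction l with
  | nil => simp
  | cons x t ih =>
    simp only [List.foldr]
    rcases ih with h | h
    · rw [h]; right; simp
    · rcases Nat.le_total x (t.foldr max 0) with hx | hx
      · right; rw [Nat.max_eq_right hx]; exact List.mem_cons_of_mem _ h
      · right; rw [Nat.max_eq_left hx]; simp

lemma le_nuMax {S P : List (Int × Int)} (hS : S.Sublist P) (hg : goodB S = true) :
    S.length ≤ nuMax P := by
  apply mem_le_foldr_max
  exact List.mem_map.mpr ⟨S, List.mem_filter.mpr ⟨List.mem_sublists.mpr hS, hg⟩, rfl⟩

lemma nuMax_witness (P : List (Int × Int)) :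
    ∃ S, S.Sublist P ∧ goodB S = true ∧ S.length = nuMax P := by
  rcases foldr_max_cases ((P.sublists.filter goodB).map List.length) with h | h
  · exact ⟨[], List.nil_sublist P, rfl, by simp [nuMax, h]⟩
  · obtain ⟨S, hSf, hlen⟩ := List.mem_map.mp h
    obtain ⟨hSs, hg⟩ := List.mem_filter.mp hSf
    exact ⟨S, List.mem_sublists.mp hSs, hg, hlen⟩

lemma nuMax_mono {P Q : List (Int × Int)} (h : P.Sublist Q) : nuMax P ≤ nuMax Q := by
  obtain ⟨S, hS, hg, hlen⟩ := nuMax_witness P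
  rw [← hlen]; exact le_nuMax (hS.trans h) hg

lemma nuMax_nil : nuMax [] = 0 := rfl

-- L2: choosing any element of P
lemma nuMax_choose {P : List (Int × Int)} {p : Int × Int} (hp : p ∈ P) :
    nuMax (P.filter (compat p)) + 1 ≤ nuMax P := by
  obtain ⟨S, hS, hg, hlen⟩ := nuMax_witness (P.filter (compat p))
  obtain ⟨P1, P2, rfl⟩ := List.append_of_mem hp
  have hfil : (P1 ++ p :: P2).filter (compat p)
      = P1.filter (compat p) ++ P2.filter (compat p) := by
    simp [List.filter_append, compat_self]
  rw [hfil] at hS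
  obtain ⟨S1, S2, rfl, h1, h2⟩ := List.sublist_append_iff.mp hS
  have hsub : (S1 ++ p :: S2).Sublist (P1 ++ p :: P2) :=
    List.Sublist.append (h1.trans List.filter_sublist) (List.Sublist.cons₂ p (h2.trans List.filter_sublist))
  have hcS : ∀ x ∈ S1 ++ S2, compat p x = true := by
    intro x hx
    have : x ∈ P1.filter (compat p) ++ P2.filter (compat p) := hS.subset hx
    rcases List.mem_append.mp this with h | h
    · exact (List.mem_filter.mp h).2
    · exact (List.mem_filter.mp h).2
  have hgood : goodB (S1 ++ p :: S2) = true := by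
    rw [goodB_iff]
    have hg' := (goodB_iff _).mp hg
    rw [List.pairwise_append] at hg' ⊢
    obtain ⟨hp1, hp2, hcross⟩ := hg'
    refine ⟨hp1, ?_, ?_⟩
    · rw [List.pairwise_cons]
      exact ⟨fun y hy => hcS y (List.mem_append.mpr (Or.inr hy)), hp2⟩
    · intro a ha b hb
      rcases List.mem_cons.mp hb with rfl | hb
      · rw [← compat_symm]; exact hcS a (List.mem_append.mpr (Or.inl ha))
      · exact hcross a ha b hb
  have := le_nuMax hsub hgood
  simp only [List.length_append, List.length_cons] at this
  simp only [List.length_append] at hlen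
  omega

lemma nuMax_cons (p : Int × Int) (rest : List (Int × Int)) :
    nuMax (p :: rest) = max (1 + nuMax (rest.filter (compat p))) (nuMax rest) := by
  apply Nat.le_antisymm
  · obtain ⟨S, hS, hg, hlen⟩ := nuMax_witness (p :: rest)
    rw [← hlen]
    rcases List.sublist_cons_iff.mp hS with h | ⟨S', rfl, hS'⟩
    · have := le_nuMax h hg; omega
    · have hall : ∀ x ∈ S', compat p x = true := by
        intro x hx
        have := (goodB_iff _).mp hg
        rw [List.pairwise_cons] at this
        exact this.1 x hx
      have hfil : S'.Sublist (rest.filter (compat p)) := by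
        have : S'.filter (compat p) = S' := List.filter_eq_self.mpr hall
        rw [← this]; exact hS'.filter _
      have hg' : goodB S' = true := by
        simp only [goodB, Bool.and_eq_true] at hg; exact hg.2
      have := le_nuMax hfil hg'
      simp only [List.length_cons]; omega
  · apply Nat.max_le.mpr
    constructor
    · obtain ⟨S, hS, hg, hlen⟩ := nuMax_witness (rest.filter (compat p))
      have hsub : (p :: S).Sublist (p :: rest) :=
        List.Sublist.cons₂ p (hS.trans List.filter_sublist)
      have hgood : goodB (p :: S) = true := by
        simp only [goodB, Bool.and_eq_true, List.all_eq_true]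
        exact ⟨fun x hx => (List.mem_filter.mp (hS.subset hx)).2, hg⟩
      have := le_nuMax hsub hgood
      simp only [List.length_cons] at this; omega
    · exact nuMax_mono (List.sublist_cons_self p rest)

lemma best_eq_aux : ∀ (n : Nat) (P : List (Int × Int)), P.length ≤ n → best P = (nuMax P : Int) := by
  intro n
  induction n with
  | zero =>
    intro P hP
    have : P = [] := List.length_eq_zero_iff.mp (by omega)
    subst this; simp [best, nuMax_nil]
  | succ n ih =>
    intro P hP
    match P with
    | [] => simp [best, nuMax_nil]
    | p :: rest =>
      have hr : rest.length ≤ n := by simp only [List.length_cons] at hP; omega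
      have hf : (rest.filter (compat p)).length ≤ n :=
        le_trans (List.length_filter_le _ _) hr
      rw [best, ih _ hf, ih _ hr, nuMax_cons]
      push_cast
      omega

lemma best_eq_nuMax (P : List (Int × Int)) : best P = (nuMax P : Int) :=
  best_eq_aux P.length P le_rfl

lemma best_nonneg (P : List (Int × Int)) : 0 ≤ best P := by
  rw [best_eq_nuMax]; exact Int.natCast_nonneg _

lemma nuMax_pos_of_ne_nil {P : List (Int × Int)} (h : P ≠ []) : 1 ≤ nuMax P := by
  obtain ⟨p, t, rfl⟩ := List.exists_cons_of_ne_nil h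
  have hsub : [p].Sublist (p :: t) := List.Sublist.cons₂ p (List.nil_sublist t)
  have := le_nuMax hsub (by simp [goodB])
  simpa using this

lemma nuMax_decomp {P : List (Int × Int)} (h : P ≠ []) :
    nuMax P = 1 + (List.range P.length).foldr
      (fun idx a => max (nuMax (P.filter (compat (P.getD idx (0, 0))))) a) 0 := by
  have hform : (List.range P.length).foldr
      (fun idx a => max (nuMax (P.filter (compat (P.getD idx (0, 0))))) a) 0
      = ((List.range P.length).map
          (fun idx => nuMax (P.filter (compat (P.getD idx (0, 0)))))).foldr max 0 := by
    rw [List.foldr_map]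
  apply Nat.le_antisymm
  · obtain ⟨S, hS, hg, hlen⟩ := nuMax_witness P
    rw [← hlen]
    match S, hg with
    | [], _ => exact Nat.zero_le _
    | s :: S', hg =>
      have hsP : s ∈ P := hS.subset (List.mem_cons_self ..)
      obtain ⟨idx, hidx, hget⟩ := List.mem_iff_getElem.mp hsP
      have hgd : P.getD idx (0, 0) = s := by rw [List.getD_eq_getElem P (0,0) hidx, hget]
      have hall : ∀ x ∈ S', compat s x = true := by
        intro x hx
        have := (goodB_iff _).mp hg
        rw [List.pairwise_cons] at this
        exact this.1 x hx
      have hS' : S'.Sublist (P.filter (compat s)) := by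
        have he : S'.filter (compat s) = S' := List.filter_eq_self.mpr hall
        rw [← he]
        exact ((List.sublist_cons_self s S').trans hS).filter _
      have hg' : goodB S' = true := by
        simp only [goodB, Bool.and_eq_true] at hg; exact hg.2
      have h1 : S'.length ≤ nuMax (P.filter (compat s)) := le_nuMax hS' hg'
      have h2 : nuMax (P.filter (compat s)) ≤ (List.range P.length).foldr
          (fun idx a => max (nuMax (P.filter (compat (P.getD idx (0, 0))))) a) 0 := by
        rw [hform]
        apply mem_le_foldr_max
        apply List.mem_map.mpr
        exact ⟨idx, List.mem_range.mpr hidx, by rw [hgd]⟩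
      simp only [List.length_cons]; omega
  · rw [hform]
    rcases foldr_max_cases ((List.range P.length).map
        (fun idx => nuMax (P.filter (compat (P.getD idx (0, 0)))))) with hc | hc
    · rw [hc]; simpa using nuMax_pos_of_ne_nil h
    · obtain ⟨idx, hidx, hval⟩ := List.mem_map.mp hc
      have hlt : idx < P.length := List.mem_range.mp hidx
      have hmem : P.getD idx (0, 0) ∈ P := by
        rw [List.getD_eq_getElem P (0,0) hlt]; exact List.getElem_mem hlt
      have hch := nuMax_choose hmem
      omega


-- ===== loop invariant for A's queue =====
def supv (l : List (List (Int × Int) × Nat × Int)) : Int :=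
  l.foldr (fun s a => max (s.2.2 + best s.1) a) 0

lemma supv_nonneg (l : List (List (Int × Int) × Nat × Int)) : 0 ≤ supv l := by
  induction l with
  | nil => simp [supv]
  | cons x t ih => simp only [supv, List.foldr] at *; omega

lemma foldr_sup_init (l : List (List (Int × Int) × Nat × Int)) (i : Int) (hi : 0 ≤ i) :
    l.foldr (fun s a => max (s.2.2 + best s.1) a) i = max (supv l) i := by
  induction l with
  | nil => simp [supv]; omega
  | cons x t ih => simp only [supv, List.foldr] at *; omega

lemma supv_append (l1 l2 : List (List (Int × Int) × Nat × Int)) :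
    supv (l1 ++ l2) = max (supv l1) (supv l2) := by
  simp only [supv, List.foldr_append]
  exact foldr_sup_init l1 _ (supv_nonneg l2)

lemma child_eq (P : List (Int × Int)) (p : Int × Int) :
    removeUsedPairs (removeUsedPairs P p.1) p.2 = P.filter (compat p) := by
  unfold removeUsedPairs
  rw [List.filter_filter]
  apply List.filter_congr
  intro x _
  rw [Bool.eq_iff_iff]
  simp [compat]
  tauto

lemma foldr_max_shift (g : Nat → Nat) (c : Int) (hc : 0 ≤ c) :
    ∀ l : List Nat, l ≠ [] →
      l.foldr (fun x a => max (c + (g x : Int)) a) 0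
        = c + ((l.foldr (fun x a => max (g x) a) 0 : Nat) : Int) := by
  intro l
  induction l with
  | nil => intro h; exact absurd rfl h
  | cons x t ih =>
    intro _
    match t, ih with
    | [], _ => simp only [List.foldr]; push_cast; omega
    | y :: t2, ih =>
      simp only [List.foldr] at *
      rw [ih (by simp)]
      push_cast
      omega

lemma sup_children (P : List (Int × Int)) (np : Int) (hP : P ≠ []) (hnp : 0 ≤ np) :
    (List.range P.length).foldr (fun idx a =>
        max (np + 1 + best (removeUsedPairs (removeUsedPairs P (P.getD idx (0, 0)).1)
          (P.getD idx (0, 0)).2)) a) 0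
      = np + best P := by
  have hlen0 : P.length ≠ 0 := fun h => hP (List.length_eq_zero_iff.mp h)
  have hne : List.range P.length ≠ [] := by
    simp [List.range_eq_nil, hlen0]
  have hrw : (List.range P.length).foldr (fun idx a =>
        max (np + 1 + best (removeUsedPairs (removeUsedPairs P (P.getD idx (0, 0)).1)
          (P.getD idx (0, 0)).2)) a) 0
      = (List.range P.length).foldr (fun idx a =>
        max ((np + 1) + ((nuMax (P.filter (compat (P.getD idx (0, 0)))) : Nat) : Int)) a) 0 := by
    simp only [child_eq, best_eq_nuMax, add_assoc]
  rw [hrw, foldr_max_shift _ (np + 1) (by omega) _ hne, best_eq_nuMax, nuMax_decomp hP]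
  push_cast
  omega

lemma aLoop_eq : ∀ (n : Nat) (stack : List (List (Int × Int) × Nat × Int)) (m : Int),
    msum stack ≤ n → (∀ s ∈ stack, s.2.1 = 0 ∧ 0 ≤ s.2.2) → 0 ≤ m →
    aLoop stack m = max m (supv stack) := by
  intro n
  induction n using Nat.strong_induction_on with
  | _ n ih =>
    intro stack m hn hst hm
    match stack with
    | [] =>
      rw [aLoop]
      simp [supv]
      omega
    | (P, start, np) :: rest =>
      obtain ⟨hs0, hnp⟩ := hst _ (List.mem_cons_self ..)
      simp only at hs0 hnp
      subst hs0
      have hmsum : msum ((P, 0, np) :: rest) = Nat.factorial (P.length + 1) + msum rest := by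
        simp [msum]
      have hfp := Nat.factorial_pos (P.length + 1)
      rw [aLoop]
      by_cases hc : P.length = 0 ∨ P.length ≤ 0
      · rw [if_pos hc]
        have hP : P = [] := List.length_eq_zero_iff.mp (by omega)
        subst hP
        have hm' : 0 ≤ (if np > m then np else m) := by split_ifs <;> omega
        rw [ih (msum rest) (by omega) rest _ le_rfl
          (fun s hs => hst s (List.mem_cons_of_mem _ hs)) hm']
        have h0 : best [] = 0 := by simp [best]
        have hsr := supv_nonneg rest
        simp only [supv, List.foldr, h0] at *
        split_ifs <;> omega
      · rw [if_neg hc]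
        dsimp only
        have hlen : 0 < P.length := by omega
        have hlt := msum_children_lt P 0 np rest hlen
        have hch : ∀ s ∈ rest ++ (List.range' 0 (P.length - 0)).map (fun idx =>
            (removeUsedPairs (removeUsedPairs P (P.getD idx (0, 0)).1) (P.getD idx (0, 0)).2,
              (0 : Nat), np + 1)), s.2.1 = 0 ∧ 0 ≤ s.2.2 := by
          intro s hs
          rcases List.mem_append.mp hs with h | h
          · exact hst s (List.mem_cons_of_mem _ h)
          · obtain ⟨idx, _, rfl⟩ := List.mem_map.mp h
            exact ⟨rfl, by show (0:Int) ≤ np + 1; omega⟩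
        rw [ih _ (by omega) _ m le_rfl hch hm, supv_append]
        have hrange : List.range' 0 (P.length - 0) = List.range P.length := by
          rw [Nat.sub_zero, List.range_eq_range']
        have hsupc : supv ((List.range' 0 (P.length - 0)).map (fun idx =>
            (removeUsedPairs (removeUsedPairs P (P.getD idx (0, 0)).1) (P.getD idx (0, 0)).2,
              (0 : Nat), np + 1))) = np + best P := by
          rw [hrange]
          simp only [supv, List.foldr_map]
          exact sup_children P np (by intro h; rw [h] at hlen; simp at hlen) hnp
        rw [hsupc]
        have hsr := supv_nonneg rest
        have hb := best_nonneg P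
        simp only [supv, List.foldr]
        omega

lemma buildPairs_eq (A : List Int) : buildPairs A = pairsB A := by
  have h := PySem.List.foldl_append_if
    (fun i => PySem.Int.mod (A.getD i 0 + A.getD ((i + 1) % A.length) 0) 2 == 0)
    (fun i => ((i : Int), (((i + 1) % A.length : Nat) : Int)))
    (List.range A.length) ([] : List (Int × Int))
  simpa [buildPairs, pairsB] using h

-- ===== VERDICT (by name: the statement is the Claim_ definition above) =====
theorem solution_spec : Claim_equal_solution := by
  intro A _
  unfold Spec_solution solution solution_alt
  by_cases h : (A.length == 1) = true
  · rw [if_pos h, if_pos h]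
  · rw [if_neg h, if_neg h]
    rw [aLoop_eq (msum [(buildPairs A, 0, 0)]) _ 0 le_rfl
      (by intro s hs; rcases List.mem_cons.mp hs with rfl | hs; exact ⟨rfl, le_rfl⟩; cases hs)
      le_rfl]
    have hb := best_nonneg (buildPairs A)
    simp only [supv, List.foldr]
    rw [buildPairs_eq]
    have hb2 := best_nonneg (pairsB A)
    omega
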